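-- pv_equiv track=rewrite | github.com/LiYingZe/UpdatebleCardIndex | loadDataSet.py | binaryRow2Zencode
-- ===== SOURCE A (Python) =====
-- def binaryRow2Zencode(binaryRowList):
--     newEncode = []
--     lenList = []
--     for  Listi in binaryRowList:
--         lenList.append(len(Listi))
--     for  loopIter in range(max(lenList)):
--         for Listi in binaryRowList:
--             if loopIter >= len(Listi):
--                 continue
--             else:
--                 newEncode.append(Listi[loopIter])
--     return newEncode
-- ===== SOURCE B (Python) =====
-- _SENT = object()
--
-- def binaryRow2Zencode(binaryRowList):
--     # Column-major flatten: keep a list of live iterators, drop each as it is exhausted.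
--     out = []
--     active = [iter(row) for row in binaryRowList]
--     while active:
--         nxt = []
--         for it in active:
--             x = next(it, _SENT)
--             if x is not _SENT:
--                 out.append(x)
--                 nxt.append(it)
--         active = nxt
--     return out
-- ===== Notes on version B (the rewrite author's own statement) =====
-- stated objective: alternative
-- what changed: Replaces the column-index double loop (which rescans every row for each column index up to the global max length) by repeated passes over a shrinking list of live row iterators, dropping each row from the active list as it is exhausted.
-- crash fix: On the empty list A raises ValueError (max() of an empty sequence) while B returns []. — e.g. on binaryRow2Zencode([]): A raises ValueError, B returns []
import Mathlib
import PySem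

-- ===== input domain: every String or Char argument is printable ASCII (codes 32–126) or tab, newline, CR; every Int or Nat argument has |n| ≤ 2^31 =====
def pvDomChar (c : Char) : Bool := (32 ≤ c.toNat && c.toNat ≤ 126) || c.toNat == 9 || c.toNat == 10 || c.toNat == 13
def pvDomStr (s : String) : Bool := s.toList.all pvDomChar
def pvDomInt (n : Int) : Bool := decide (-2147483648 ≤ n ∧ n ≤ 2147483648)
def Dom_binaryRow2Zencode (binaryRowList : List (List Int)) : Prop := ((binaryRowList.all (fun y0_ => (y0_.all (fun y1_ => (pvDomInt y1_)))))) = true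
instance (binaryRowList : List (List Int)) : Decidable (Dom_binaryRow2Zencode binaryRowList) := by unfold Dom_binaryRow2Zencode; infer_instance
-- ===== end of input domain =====

-- B replaces A's column-index double loop (one pass over all rows per column index) by
-- passes over a shrinking list of live row iterators, dropping each row once exhausted.

-- ===== PORT A =====
def binaryRow2Zencode (binaryRowList : List (List Int)) : List Int :=
  let lenList := binaryRowList.foldl (fun acc r => acc ++ [PySem.List.len r]) []
  match PySem.List.max? lenList (fun y => y) with
  | none => []   -- Python: max() of empty sequence raises ValueError; excluded by Pre_
  | some m =>
      (PySem.List.pyRange 0 m 1).foldl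
        (fun acc i =>
          binaryRowList.foldl
            (fun acc r =>
              if i ≥ PySem.List.len r then acc
              else acc ++ [PySem.List.pyGetD r i 0]) acc) []

-- ===== PORT B =====
-- the next value of `active`: remainders of the rows whose iterator was not yet exhausted
def pvT (active : List (List Int)) : List (List Int) :=
  (active.filter (fun r => !r.isEmpty)).map List.tail

-- termination measure lemma used by the port's decreasing_by
theorem pvTailsMeasure_le (l : List (List Int)) :
    (((pvT l).map List.length).sum + (pvT l).length) ≤ (l.map List.length).sum := by
  induction l with
  | nil => simp [pvT]
  | cons r t ih =>
    cases r with
    | nil => simpa [pvT] using ih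
    | cons a rest =>
      simp only [pvT, List.filter_cons] at *
      simp at *
      omega

-- one pass of the Python while-loop: heads of the still-live rows, then recurse on
-- their remainders (exhausted rows are dropped from `active`)
def binaryRow2Zencode_alt (active : List (List Int)) : List Int :=
  if active = [] then []
  else active.filterMap List.head? ++ binaryRow2Zencode_alt (pvT active)
termination_by (active.map List.length).sum + active.length
decreasing_by
  have h := pvTailsMeasure_le active
  have : 1 ≤ active.length := by
    cases active with
    | nil => simp_all
    | cons _ _ => simp
  omega

-- ===== PRECONDITION & SPEC =====
-- A calls max() on the list of row lengths, which raises ValueError when the outer list is empty.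
def Pre_binaryRow2Zencode (binaryRowList : List (List Int)) : Prop := binaryRowList ≠ []
instance (binaryRowList : List (List Int)) : Decidable (Pre_binaryRow2Zencode binaryRowList) := by unfold Pre_binaryRow2Zencode; infer_instance
def pvWitness_binaryRow2Zencode : List (List Int) := [[1, 2], [3]]

-- On the empty list A raises ValueError (max() of an empty sequence) while B returns [].
def Raises_binaryRow2Zencode (binaryRowList : List (List Int)) : Prop := binaryRowList = []
instance (binaryRowList : List (List Int)) : Decidable (Raises_binaryRow2Zencode binaryRowList) := by unfold Raises_binaryRow2Zencode; infer_instance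
def pvRaiseWitness_binaryRow2Zencode : List (List Int) := []
def pvRaiseWitnessOut_binaryRow2Zencode : List Int := []

def Spec_binaryRow2Zencode (binaryRowList : List (List Int)) (out : List Int) : Prop := out = binaryRow2Zencode_alt binaryRowList
instance (binaryRowList : List (List Int)) (out : List Int) : Decidable (Spec_binaryRow2Zencode binaryRowList out) := by unfold Spec_binaryRow2Zencode; infer_instance

-- ===== CLAIM (what is proved, stated in full; the proofs are below) =====
def Claim_equal_binaryRow2Zencode : Prop := ∀ (binaryRowList : List (List Int)), Dom_binaryRow2Zencode binaryRowList → Pre_binaryRow2Zencode binaryRowList → Spec_binaryRow2Zencode binaryRowList (binaryRow2Zencode binaryRowList)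
def Claim_raises_binaryRow2Zencode : Prop := (∀ (binaryRowList : List (List Int)), Dom_binaryRow2Zencode binaryRowList → Raises_binaryRow2Zencode binaryRowList → ¬ Pre_binaryRow2Zencode binaryRowList) ∧ (Dom_binaryRow2Zencode (pvRaiseWitness_binaryRow2Zencode) ∧ Raises_binaryRow2Zencode (pvRaiseWitness_binaryRow2Zencode) ∧ binaryRow2Zencode_alt (pvRaiseWitness_binaryRow2Zencode) = pvRaiseWitnessOut_binaryRow2Zencode)

-- ===== LEMMAS AND PROOFS =====

-- column i of the ragged matrix, and the first m columns concatenated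
def pvCol (i : Nat) (l : List (List Int)) : List Int := l.filterMap (fun r => r[i]?)
def pvCols (m : Nat) (l : List (List Int)) : List Int := (List.range m).flatMap (fun i => pvCol i l)
def pvMaxLen (l : List (List Int)) : Nat := l.foldl (fun m r => max m r.length) 0

theorem pv_foldl_max (t : List (List Int)) : ∀ a : Nat,
    t.foldl (fun m r => max m r.length) a
      = max a (t.foldl (fun m r => max m r.length) 0) := by
  induction t with
  | nil => intro a; simp
  | cons r s ih =>
    intro a
    simp only [List.foldl_cons]
    rw [ih, ih (max 0 r.length)]
    omega

theorem pvMaxLen_cons (r : List Int) (t : List (List Int)) :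
    pvMaxLen (r :: t) = max r.length (pvMaxLen t) := by
  simp only [pvMaxLen, List.foldl_cons]
  rw [pv_foldl_max]
  omega

theorem pvT_cons_nil (t : List (List Int)) : pvT ([] :: t) = pvT t := by simp [pvT]
theorem pvT_cons (a : Int) (rest : List Int) (t : List (List Int)) :
    pvT ((a :: rest) :: t) = rest :: pvT t := by simp [pvT]

theorem pvMaxLen_pvT (l : List (List Int)) : pvMaxLen (pvT l) = pvMaxLen l - 1 := by
  induction l with
  | nil => simp [pvT, pvMaxLen]
  | cons r t ih =>
    cases r with
    | nil =>
      rw [pvT_cons_nil, ih, pvMaxLen_cons]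
      simp only [List.length_nil]
      omega
    | cons a rest =>
      rw [pvT_cons, pvMaxLen_cons, pvMaxLen_cons, ih]
      simp only [List.length_cons]
      omega

theorem pvCol_succ (i : Nat) (l : List (List Int)) : pvCol (i + 1) l = pvCol i (pvT l) := by
  induction l with
  | nil => rfl
  | cons r t ih =>
    cases r with
    | nil => rw [pvT_cons_nil, ← ih]; simp [pvCol]
    | cons a rest => rw [pvT_cons]; simp only [pvCol, List.filterMap_cons] at *; simp [ih]

theorem pvCol_zero (l : List (List Int)) : pvCol 0 l = l.filterMap List.head? := by
  simp [pvCol, List.head?_eq_getElem?]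

theorem pvCols_succ (m : Nat) (l : List (List Int)) :
    pvCols (m + 1) l = l.filterMap List.head? ++ pvCols m (pvT l) := by
  simp only [pvCols, List.range_succ_eq_map, List.flatMap_cons, List.flatMap_map]
  rw [pvCol_zero]
  congr 1
  exact List.flatMap_congr (fun i _ => by rw [Nat.succ_eq_add_one, pvCol_succ])

theorem pvMaxLen_zero (l : List (List Int)) (h : pvMaxLen l = 0) :
    l.filterMap List.head? = [] ∧ pvT l = [] := by
  induction l with
  | nil => exact ⟨rfl, rfl⟩
  | cons r t ih =>
    rw [pvMaxLen_cons] at h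
    have hr : r = [] := by cases r <;> simp_all
    subst hr
    have := ih (by omega)
    rw [pvT_cons_nil]
    simpa using this

theorem pvB_eq : ∀ (n : Nat) (l : List (List Int)), pvMaxLen l = n →
    binaryRow2Zencode_alt l = pvCols n l := by
  intro n
  induction n with
  | zero =>
    intro l h
    rw [binaryRow2Zencode_alt.eq_def]
    by_cases hl : l = []
    · simp [hl, pvCols]
    · obtain ⟨h1, h2⟩ := pvMaxLen_zero l h
      rw [if_neg hl, h1]
      show [] ++ binaryRow2Zencode_alt (pvT l) = _
      rw [h2, binaryRow2Zencode_alt.eq_def]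
      simp [pvCols]
  | succ n ih =>
    intro l h
    have hl : l ≠ [] := by rintro rfl; simp [pvMaxLen] at h
    rw [binaryRow2Zencode_alt.eq_def, if_neg hl, pvCols_succ]
    congr 1
    exact ih (pvT l) (by rw [pvMaxLen_pvT, h]; omega)

-- inner loop of A: append Listi[loopIter] for each row long enough
theorem pvInner_eq (i : Int) : ∀ (l : List (List Int)) (acc : List Int),
    l.foldl (fun acc r => if i ≥ PySem.List.len r then acc
                          else acc ++ [PySem.List.pyGetD r i 0]) acc
      = acc ++ (l.filter (fun r => decide (i < PySem.List.len r))).map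
          (fun r => PySem.List.pyGetD r i 0) := by
  intro l
  induction l with
  | nil => simp
  | cons r t ih =>
    intro acc
    rw [List.foldl_cons]
    by_cases h : i ≥ PySem.List.len r
    · have hd : decide (i < PySem.List.len r) = false := decide_eq_false (not_lt.mpr h)
      rw [if_pos h, ih, List.filter_cons, hd]
      simp
    · have hd : decide (i < PySem.List.len r) = true := decide_eq_true (lt_of_not_ge h)
      rw [if_neg h, ih, List.filter_cons, hd]
      simp [List.append_assoc]

theorem pvFilterMap_col (k : Nat) (l : List (List Int)) :
    (l.filter (fun r => decide ((k : Int) < PySem.List.len r))).map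
        (fun r => PySem.List.pyGetD r (k : Int) 0)
      = pvCol k l := by
  induction l with
  | nil => rfl
  | cons r t ih =>
    by_cases h : k < r.length
    · have hd : decide ((k : Int) < PySem.List.len r) = true := by
        rw [PySem.List.len_eq]; simp; exact_mod_cast h
      rw [List.filter_cons, hd]
      simp only [if_true, List.map_cons, pvCol, List.filterMap_cons,
        List.getElem?_eq_getElem h]
      rw [ih]
      simp [pvCol, PySem.List.pyGetD_natCast, List.getD_eq_getElem?_getD,
        List.getElem?_eq_getElem h]
    · have hd : decide ((k : Int) < PySem.List.len r) = false := by
        rw [PySem.List.len_eq]; simp; exact_mod_cast Nat.not_lt.mp h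
      rw [List.filter_cons, hd]
      simp only [Bool.false_eq_true, if_false, pvCol, List.filterMap_cons,
        List.getElem?_eq_none_iff.mpr (Nat.not_lt.mp h)]
      rw [ih]
      simp [pvCol]

-- the cast of A's running max of Int lengths is pvMaxLen
theorem pvMax_cast (t : List (List Int)) : ∀ a : Nat,
    (t.map PySem.List.len).foldl max ((a : Nat) : Int)
      = ((t.foldl (fun m r => max m r.length) a : Nat) : Int) := by
  induction t with
  | nil => intro a; simp
  | cons r s ih =>
    intro a
    simp only [List.map_cons, List.foldl_cons, PySem.List.len_eq]
    rw [show max ((a : Nat) : Int) ((r.length : Nat) : Int)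
          = ((max a r.length : Nat) : Int) by exact_mod_cast (Nat.cast_max ..).symm, ih]

theorem pvA_eq (l : List (List Int)) (h : l ≠ []) :
    binaryRow2Zencode l = pvCols (pvMaxLen l) l := by
  obtain ⟨x, t, rfl⟩ : ∃ x t, l = x :: t := by
    cases l with
    | nil => exact absurd rfl h
    | cons x t => exact ⟨x, t, rfl⟩
  show binaryRow2Zencode (x :: t) = _
  unfold binaryRow2Zencode
  rw [PySem.List.foldl_append_singleton_eq_map]
  simp only [List.nil_append, List.map_cons]
  rw [PySem.List.max?_id_cons]
  have hm : (t.map PySem.List.len).foldl max (PySem.List.len x)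
      = ((pvMaxLen (x :: t) : Nat) : Int) := by
    rw [PySem.List.len_eq]
    rw [pvMax_cast t x.length]
    congr 1
  simp only [hm]
  rw [PySem.List.pyRange_zero_nat, List.foldl_map]
  have hfun : (fun (acc : List Int) (k : Nat) =>
      (x :: t).foldl (fun acc r => if ((k : Nat) : Int) ≥ PySem.List.len r then acc
                        else acc ++ [PySem.List.pyGetD r ((k : Nat) : Int) 0]) acc)
      = fun acc k => acc ++ pvCol k (x :: t) := by
    funext acc k
    rw [pvInner_eq, pvFilterMap_col]
  rw [hfun, PySem.List.foldl_append_eq_flatMap]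
  rfl

-- ===== VERDICT (by name: the statement is the Claim_ definition above) =====
theorem binaryRow2Zencode_spec : Claim_equal_binaryRow2Zencode := by
  intro l _ hpre
  unfold Spec_binaryRow2Zencode
  rw [pvA_eq l hpre, pvB_eq (pvMaxLen l) l rfl]

@[simp]
theorem binaryRow2Zencode_raises : Claim_raises_binaryRow2Zencode := by
  unfold Claim_raises_binaryRow2Zencode
  refine ⟨fun l _ hr hp => hp hr, by decide, rfl, ?_⟩
  rw [binaryRow2Zencode_alt.eq_def]
  rfl
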